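-- pv_equiv track=rewrite | github.com/svalench/kkl-connection | obd_display.py | fmt_pid_00
-- ===== SOURCE A (Python) =====
-- def fmt_pid_00(data: list[int]) -> str | None:
--     """Поддерживаемые PID (битовая маска)."""
--     if len(data) < 5:
--         return None
--     mask = data[2:6] if len(data) >= 6 else data[2:]
--     pids = []
--     for i, byte in enumerate(mask):
--         for bit in range(8):
--             if byte & (1 << (7 - bit)):
--                 pid = (i * 8 + bit) + 1
--                 if pid <= 32:
--                     pids.append(f"01 {pid:02X}")
--     return f"Поддерживаемые PID: {', '.join(pids)}" if pids else "Поддерживаемые PID: —"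
-- ===== SOURCE B (Python) =====
-- def fmt_pid_00(data: list[int]) -> str | None:
--     """Поддерживаемые PID (битовая маска)."""
--     if len(data) < 5:
--         return None
--     mask = data[2:6]
--     # pack the (at most 4) mask bytes into one big-endian integer, then peel
--     # off set bits from the top with bit_length(): each top bit is the next
--     # (smallest-numbered) supported PID, so pids come out already in order.
--     n = 0
--     for b in mask:
--         n = n * 256 + (b % 256)
--     width = 8 * len(mask)
--     pids = []
--     while n:
--         bl = n.bit_length()
--         pids.append(f"01 {width - bl + 1:02X}")
--         n -= 1 << (bl - 1)
--     body = ", ".join(pids) if pids else "—"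
--     return "Поддерживаемые PID: " + body
-- ===== Notes on version B (the rewrite author's own statement) =====
-- stated objective: alternative
-- what changed: Instead of A's nested byte/bit scan over the mask, B packs the mask bytes into one big-endian integer and repeatedly extracts the highest set bit with bit_length(), so it iterates only over the set bits (sparse extraction) and emits PIDs already in increasing order.
import Mathlib
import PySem

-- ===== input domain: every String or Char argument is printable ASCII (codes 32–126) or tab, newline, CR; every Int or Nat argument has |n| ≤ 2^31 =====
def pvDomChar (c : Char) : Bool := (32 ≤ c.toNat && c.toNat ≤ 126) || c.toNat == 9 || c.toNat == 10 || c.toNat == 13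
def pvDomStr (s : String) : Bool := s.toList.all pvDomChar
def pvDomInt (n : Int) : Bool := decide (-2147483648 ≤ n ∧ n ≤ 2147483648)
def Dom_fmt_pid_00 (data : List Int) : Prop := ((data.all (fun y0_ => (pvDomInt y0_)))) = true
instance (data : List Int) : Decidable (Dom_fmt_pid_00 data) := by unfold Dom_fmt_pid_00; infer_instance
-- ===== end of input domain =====

-- B packs the mask bytes into one big-endian integer and peels set bits off the
-- top with bit_length(), emitting PIDs in increasing order (objective: alternative).

-- shared formatting helper: Python's f"{n:02X}" — two-digit uppercase hex; exact for 0 ≤ n < 256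
def pvHexChar (n : Nat) : Char := (String.toList "0123456789ABCDEF").getD n '0'
def pvHex2 (n : Int) : String := String.ofList [pvHexChar (n.toNat / 16 % 16), pvHexChar (n.toNat % 16)]

-- ===== PORT A =====
def fmt_pid_00 (data : List Int) : Option String :=
  if data.length < 5 then none
  else
    let mask := if 6 ≤ data.length then PySem.List.slice data (some 2) (some 6)
                else PySem.List.slice data (some 2) none
    let pids := (PySem.List.enumerate mask).foldl (fun pids ib =>
      (PySem.List.pyRange 0 8 1).foldl (fun pids bit =>
        -- 1 << (7 - bit): bit ∈ range(8), so 7 - bit ≥ 0 and .toNat is exact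
        if PySem.Int.band ib.2 ((1 : Int) <<< ((7 : Int) - bit).toNat) ≠ 0 then
          if ((ib.1 * 8 + bit) + 1) ≤ 32 then pids ++ ["01 " ++ pvHex2 ((ib.1 * 8 + bit) + 1)] else pids
        else pids) pids) []
    if pids ≠ [] then some ("Поддерживаемые PID: " ++ PySem.Str.join ", " pids)
    else some "Поддерживаемые PID: —"

-- ===== PORT B =====
-- the 'while n:' loop: n ≥ 0 throughout in B (each byte is taken % 256), so the
-- guard 'n ≤ 0' is Python's 'not n'; n.bit_length() is PySem.Int.bitLength
def pvLoop (w : Int) (n : Int) : List String :=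
  if _h : n ≤ 0 then []
  else
    ("01 " ++ pvHex2 (w - (PySem.Int.bitLength n : Int) + 1)) ::
      pvLoop w (n - (1 <<< (PySem.Int.bitLength n - 1)))
termination_by n.toNat
decreasing_by
  have h1 : 2 ^ (PySem.Int.bitLength n - 1) ≤ n.natAbs :=
    PySem.Int.two_pow_bitLength_le n (by omega)
  have hE : 1 ≤ 2 ^ (PySem.Int.bitLength n - 1) := Nat.one_le_two_pow
  rw [Nat.one_shiftLeft]
  generalize (2 ^ (PySem.Int.bitLength n - 1) : Nat) = E at h1 hE
  omega

def fmt_pid_00_alt (data : List Int) : Option String :=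
  if data.length < 5 then none
  else
    let mask := PySem.List.slice data (some 2) (some 6)
    let n := mask.foldl (fun n b => n * 256 + PySem.Int.mod b 256) 0
    let width : Int := 8 * (mask.length : Int)
    let pids := pvLoop width n
    let body := if pids ≠ [] then PySem.Str.join ", " pids else "—"
    some ("Поддерживаемые PID: " ++ body)

-- ===== PRECONDITION & SPEC =====
def Spec_fmt_pid_00 (data : List Int) (out : Option String) : Prop := out = fmt_pid_00_alt data
instance (data : List Int) (out : Option String) : Decidable (Spec_fmt_pid_00 data out) := by unfold Spec_fmt_pid_00; infer_instance

-- ===== CLAIM (what is proved, stated in full; the proofs are below) =====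
def Claim_equal_fmt_pid_00 : Prop := ∀ (data : List Int), Dom_fmt_pid_00 data → Spec_fmt_pid_00 data (fmt_pid_00 data)

-- ===== LEMMAS AND PROOFS =====

-- the common value both programs compute: PIDs read off the bits of M (big-endian, w bits)
def pidsSpec (w M : Nat) : List String :=
  ((List.range w).filter (fun j => M.testBit (w - 1 - j))).map (fun (j : Nat) => "01 " ++ pvHex2 ((j:Int)+1))

-- one byte's worth of A's output (cap already removed)
def midChunk (b : Int) (i : Int) : List String :=
  (([0,1,2,3,4,5,6,7] : List Int).filter (fun bit =>
    decide (PySem.Int.band b ((1:Int) <<< ((7:Int)-bit).toNat) ≠ 0))).map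
    (fun bit => "01 " ++ pvHex2 (i * 8 + bit + 1))

theorem tb_low (a c k : Nat) (hc : c < 256) (hk : k < 8) :
    (a * 256 + c).testBit k = c.testBit k := by
  have h : (a * 256 + c) % 256 = c := by omega
  have := Nat.testBit_mod_two_pow (a * 256 + c) 8 k
  rw [show (2:Nat)^8 = 256 from rfl, h] at this
  simp [hk] at this
  exact this.symm

theorem tb_high (a c k : Nat) (hc : c < 256) :
    (a * 256 + c).testBit (8 + k) = a.testBit k := by
  rw [Nat.testBit_eq_decide_div_mod_eq, Nat.testBit_eq_decide_div_mod_eq]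
  have h : (a * 256 + c) / 2 ^ (8 + k) = a / 2 ^ k := by
    rw [pow_add, ← Nat.div_div_eq_div_mul]
    congr 1
    norm_num
    omega
  rw [h]

theorem testBit_top (m l : Nat) (h1 : 2^l ≤ m) (h2 : m < 2^(l+1)) : m.testBit l = true := by
  have hd : m / 2^l = 1 :=
    Nat.div_eq_of_lt_le (by omega) (by rw [show (1+1) * 2^l = 2^(l+1) from by ring]; omega)
  rw [Nat.testBit_eq_decide_div_mod_eq, hd]
  rfl

theorem notBit_compl (r k : Nat) (hr : r < 256) (hk : k < 8) :
    (255 - r).testBit k = !(r.testBit k) := by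
  rw [Nat.testBit_eq_decide_div_mod_eq, Nat.testBit_eq_decide_div_mod_eq]
  interval_cases k <;> rw [← decide_not, decide_eq_decide] <;> omega

-- bridge: A's 'byte & (1 << k)' test reads exactly bit k of byte % 256
theorem bandBit (b : Int) (k : Nat) (hk : k < 8) :
    (PySem.Int.mod b 256).toNat.testBit k = decide (PySem.Int.band b ((1:Int) <<< k) ≠ 0) := by
  have hsh : (1:Int) <<< k = ((2^k : Nat) : Int) := by rw [Int.shiftLeft_eq]; push_cast; ring
  have hmod : PySem.Int.mod b 256 = b % 256 := PySem.Int.mod_eq_emod_of_pos (by norm_num)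
  have hppos : 0 < (2:Nat)^k := Nat.two_pow_pos k
  by_cases hb : 0 ≤ b
  · have hbn : b = ((b.toNat : Nat) : Int) := by omega
    have hband : PySem.Int.band b ((2^k : Nat) : Int) = ((b.toNat &&& 2^k : Nat) : Int) := by
      rw [hbn]; exact PySem.Int.band_natCast _ _
    have hm : (PySem.Int.mod b 256).toNat = b.toNat % 256 := by rw [hmod]; omega
    rw [hsh, hband, hm]
    rw [show (256:Nat) = 2^8 from rfl, Nat.testBit_mod_two_pow]
    simp only [hk, decide_true, Bool.true_and]
    rw [Nat.and_two_pow]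
    cases h : b.toNat.testBit k <;> simp
  -- b < 0: Python two's complement; band b 2^k ≠ 0 ↔ bit k of ~b is 0
  · set t := (-b - 1).toNat with ht
    have hbt : b = -1 - (t : Int) := by omega
    have hband : PySem.Int.band b ((2^k : Nat) : Int)
        = (((2^k : Nat) - (2^k &&& t : Nat) : Nat) : Int) := by
      unfold PySem.Int.band
      rw [if_neg (by omega), if_pos (by positivity), Int.toNat_natCast]
    have hm : (PySem.Int.mod b 256).toNat = 255 - t % 256 := by rw [hmod, hbt]; omega
    rw [hsh, hband, hm]
    have htk : t.testBit k = (t % 256).testBit k := by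
      rw [show (256:Nat) = 2^8 from rfl, Nat.testBit_mod_two_pow]
      simp [hk]
    rw [notBit_compl (t % 256) k (Nat.mod_lt _ (by norm_num)) hk, ← htk]
    rw [Nat.two_pow_and]
    cases h : t.testBit k <;> simp

-- the second half of a split pidsSpec is exactly A's chunk for that byte
theorem byteChunk (b : Int) (i : Int) (w : Nat) (hw : ((w : Nat) : Int) = i * 8) :
    ((List.range 8).filter (fun t => (PySem.Int.mod b 256).toNat.testBit (7-t))).map
      (fun (t : Nat) => "01 " ++ pvHex2 ((w:Int) + (t:Int) + 1)) = midChunk b i := by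
  unfold midChunk
  rw [show ([0,1,2,3,4,5,6,7] : List Int) = (List.range 8).map (fun (t : Nat) => (t:Int)) from by decide]
  rw [List.filter_map, List.map_map]
  rw [List.filter_congr (fun t ht => ?_)]
  · exact List.map_congr_left (fun t _ => by
      simp only [Function.comp_apply]
      rw [← hw])
  · have ht8 : t < 8 := List.mem_range.mp ht
    simp only [Function.comp_apply]
    interval_cases t
    · rw [show (7:Nat) - 0 = 7 from rfl, show (((7:Int) - ((0:Nat):Int)).toNat) = 7 from by decide]
      exact bandBit b 7 (by norm_num)
    · rw [show (7:Nat) - 1 = 6 from rfl, show (((7:Int) - ((1:Nat):Int)).toNat) = 6 from by decide]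
      exact bandBit b 6 (by norm_num)
    · rw [show (7:Nat) - 2 = 5 from rfl, show (((7:Int) - ((2:Nat):Int)).toNat) = 5 from by decide]
      exact bandBit b 5 (by norm_num)
    · rw [show (7:Nat) - 3 = 4 from rfl, show (((7:Int) - ((3:Nat):Int)).toNat) = 4 from by decide]
      exact bandBit b 4 (by norm_num)
    · rw [show (7:Nat) - 4 = 3 from rfl, show (((7:Int) - ((4:Nat):Int)).toNat) = 3 from by decide]
      exact bandBit b 3 (by norm_num)
    · rw [show (7:Nat) - 5 = 2 from rfl, show (((7:Int) - ((5:Nat):Int)).toNat) = 2 from by decide]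
      exact bandBit b 2 (by norm_num)
    · rw [show (7:Nat) - 6 = 1 from rfl, show (((7:Int) - ((6:Nat):Int)).toNat) = 1 from by decide]
      exact bandBit b 1 (by norm_num)
    · rw [show (7:Nat) - 7 = 0 from rfl, show (((7:Int) - ((7:Nat):Int)).toNat) = 0 from by decide]
      exact bandBit b 0 (by norm_num)

theorem pidsSpec_split (w M r : Nat) (hr : r < 256) :
    pidsSpec (w+8) (M*256 + r)
      = pidsSpec w M ++ ((List.range 8).filter (fun t => r.testBit (7-t))).map
          (fun (t : Nat) => "01 " ++ pvHex2 ((w:Int) + (t:Int) + 1)) := by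
  unfold pidsSpec
  rw [List.range_add, List.filter_append, List.map_append]
  have hpred1 : ∀ j ∈ List.range w, ((M*256+r).testBit (w+8-1-j)) = M.testBit (w-1-j) := by
    intro j hj
    have hjw : j < w := List.mem_range.mp hj
    rw [show w + 8 - 1 - j = 8 + (w - 1 - j) from by omega, tb_high M r _ hr]
  rw [List.filter_congr hpred1]
  congr 1
  rw [List.filter_map, List.map_map]
  have hpred2 : ∀ t ∈ List.range 8,
      (((fun j => (M*256+r).testBit (w+8-1-j)) ∘ (fun x => w + x)) t) = r.testBit (7-t) := by
    intro t ht
    have htw : t < 8 := List.mem_range.mp ht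
    simp only [Function.comp_apply]
    rw [show w + 8 - 1 - (w + t) = 7 - t from by omega, tb_low M r _ hr (by omega)]
  rw [List.filter_congr hpred2]
  exact List.map_congr_left (fun t _ => by
    simp only [Function.comp_apply]
    have hc : ((w + t : Nat) : Int) + 1 = (w:Int) + (t:Int) + 1 := by push_cast; ring
    rw [hc])

-- pulling the top set bit off M removes exactly the head of pidsSpec
theorem pidsSpec_step (w l m m' : Nat) (hlw : l < w) (hm : 2^l ≤ m) (hm2 : m < 2^(l+1))
    (hm' : m' = m - 2^l) :
    pidsSpec w m = ("01 " ++ pvHex2 (((w - 1 - l : Nat) : Int) + 1)) :: pidsSpec w m' := by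
  have hmeq : m = 2^l + m' := by omega
  have hm'lt : m' < 2^l := by omega
  have Fhigh : ∀ k, l < k → m.testBit k = false := fun k hk =>
    Nat.testBit_lt_two_pow (lt_of_lt_of_le hm2 (Nat.pow_le_pow_right (by norm_num) hk))
  have Fhigh' : ∀ k, l ≤ k → m'.testBit k = false := fun k hk =>
    Nat.testBit_lt_two_pow (lt_of_lt_of_le hm'lt (Nat.pow_le_pow_right (by norm_num) hk))
  have Flow : ∀ k, k < l → m.testBit k = m'.testBit k := by
    intro k hk
    rw [hmeq, Nat.testBit_two_pow_add_gt hk]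
  have Ftop : m.testBit l = true := testBit_top m l hm hm2
  set j0 := w - 1 - l with hj0
  have hsplit : List.range w = (List.range j0 ++ [j0]) ++ (List.range (w - (j0+1))).map (fun t => (j0+1) + t) := by
    rw [← List.range_succ, ← List.range_add]
    congr 1
    omega
  unfold pidsSpec
  rw [hsplit]
  simp only [List.filter_append, List.map_append]
  have e1 : (List.range j0).filter (fun j => m.testBit (w - 1 - j)) = [] := by
    rw [List.filter_eq_nil_iff]
    intro j hj
    have : j < j0 := List.mem_range.mp hj
    simp [Fhigh (w - 1 - j) (by omega)]
  have e1' : (List.range j0).filter (fun j => m'.testBit (w - 1 - j)) = [] := by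
    rw [List.filter_eq_nil_iff]
    intro j hj
    have : j < j0 := List.mem_range.mp hj
    simp [Fhigh' (w - 1 - j) (by omega)]
  have e2 : ([j0]).filter (fun j => m.testBit (w - 1 - j)) = [j0] := by
    simp [List.filter, show w - 1 - j0 = l by omega, Ftop]
  have e2' : ([j0]).filter (fun j => m'.testBit (w - 1 - j)) = [] := by
    simp [List.filter, show w - 1 - j0 = l by omega, Fhigh' l le_rfl]
  have e3 : ((List.range (w - (j0+1))).map (fun t => (j0+1) + t)).filter (fun j => m.testBit (w - 1 - j))
      = ((List.range (w - (j0+1))).map (fun t => (j0+1) + t)).filter (fun j => m'.testBit (w - 1 - j)) := by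
    rw [List.filter_map, List.filter_map]
    congr 1
    apply List.filter_congr
    intro t ht
    have htw : t < w - (j0+1) := List.mem_range.mp ht
    simp only [Function.comp_apply]
    exact Flow (w - 1 - (j0 + 1 + t)) (by omega)
  rw [e1, e2, e3, e1', e2']
  simp [j0]

theorem pvLoop_eq (w : Nat) (m : Nat) (hm : m < 2^w) :
    pvLoop (w : Int) (m : Int) = pidsSpec w m := by
  induction m using Nat.strong_induction_on with
  | _ m IH =>
    rcases Nat.eq_zero_or_pos m with h0 | h0
    · subst h0
      rw [pvLoop]
      simp [pidsSpec, Nat.zero_testBit]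
    · rw [pvLoop, dif_neg (by omega)]
      have hub : m < 2 ^ PySem.Int.bitLength (m:Int) := by
        simpa using PySem.Int.lt_two_pow_bitLength (m : Int)
      have hlb : 2 ^ (PySem.Int.bitLength (m:Int) - 1) ≤ m := by
        simpa using PySem.Int.two_pow_bitLength_le (m : Int) (by simp; omega)
      generalize PySem.Int.bitLength (m:Int) = bl at hub hlb ⊢
      obtain ⟨l, rfl⟩ : ∃ l, bl = l + 1 := by
        refine ⟨bl - 1, ?_⟩
        rcases Nat.eq_zero_or_pos bl with hh | hh
        · rw [hh] at hub; simp at hub; omega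
        · omega
      rw [Nat.add_sub_cancel] at hlb
      have hlw : l < w := by
        have h2 : 2 ^ l < 2 ^ w := lt_of_le_of_lt hlb hm
        exact (Nat.pow_lt_pow_iff_right (by norm_num)).mp h2
      have hsub : (m : Int) - ((1 <<< (l + 1 - 1) : Nat) : Int) = ((m - 2^l : Nat) : Int) := by
        rw [Nat.one_shiftLeft, Nat.add_sub_cancel, Nat.cast_sub hlb]
      rw [hsub, IH (m - 2^l) (by have := Nat.one_le_two_pow (n := l); omega) (by omega)]
      rw [pidsSpec_step w l m (m - 2^l) hlw hlb hub rfl]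
      have harg : (w:Int) - ((l + 1 : Nat) : Int) + 1 = ((w - 1 - l : Nat) : Int) + 1 := by
        push_cast
        omega
      rw [harg]

-- A's per-byte chunk: the 'pid ≤ 32' cap is vacuous for i ≤ 3, leaving midChunk
theorem dropCap (b : Int) (i : Int) (hi : 0 ≤ i) (hi3 : i ≤ 3) :
    (([0,1,2,3,4,5,6,7] : List Int).filter (fun bit =>
      decide (PySem.Int.band b ((1:Int) <<< ((7:Int)-bit).toNat) ≠ 0 ∧ (i*8+bit)+1 ≤ 32))).map
      (fun bit => "01 " ++ pvHex2 ((i*8+bit)+1)) = midChunk b i := by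
  unfold midChunk
  have hpred : ∀ bit ∈ ([0,1,2,3,4,5,6,7] : List Int),
      (decide (PySem.Int.band b ((1:Int) <<< ((7:Int)-bit).toNat) ≠ 0 ∧ (i*8+bit)+1 ≤ 32))
        = decide (PySem.Int.band b ((1:Int) <<< ((7:Int)-bit).toNat) ≠ 0) := by
    intro bit hbit
    have hb : 0 ≤ bit ∧ bit ≤ 7 := by fin_cases hbit <;> norm_num
    have hcap : (i*8+bit)+1 ≤ 32 := by omega
    simp [hcap]
  rw [List.filter_congr hpred]

theorem modNatLt (b : Int) : (PySem.Int.mod b 256).toNat < 256 := by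
  have h1 : PySem.Int.mod b 256 < 256 := PySem.Int.mod_lt _ (by norm_num)
  have h2 : 0 ≤ PySem.Int.mod b 256 := PySem.Int.mod_nonneg _ (by norm_num)
  omega

theorem modCast (b : Int) : (((PySem.Int.mod b 256).toNat : Nat) : Int) = PySem.Int.mod b 256 :=
  Int.toNat_of_nonneg (PySem.Int.mod_nonneg _ (by norm_num))

theorem pidsSpec_byte (b : Int) : pidsSpec 8 (PySem.Int.mod b 256).toNat = midChunk b 0 := by
  have h := pidsSpec_split 0 0 (PySem.Int.mod b 256).toNat (modNatLt b)
  simp only [zero_add, zero_mul] at h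
  rw [h, show pidsSpec 0 0 = [] from by simp [pidsSpec], List.nil_append]
  exact byteChunk b 0 0 (by norm_num)

theorem spec3 (x y z : Int) :
    pidsSpec (8+8+8)
      (((PySem.Int.mod x 256).toNat * 256 + (PySem.Int.mod y 256).toNat) * 256
        + (PySem.Int.mod z 256).toNat)
  = midChunk x 0 ++ midChunk y 1 ++ midChunk z 2 := by
  rw [pidsSpec_split (8+8) _ _ (modNatLt z), pidsSpec_split 8 _ _ (modNatLt y), pidsSpec_byte x,
    byteChunk y 1 8 (by norm_num), byteChunk z 2 (8+8) (by norm_num)]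

theorem spec4 (x y z w : Int) :
    pidsSpec (8+8+8+8)
      ((((PySem.Int.mod x 256).toNat * 256 + (PySem.Int.mod y 256).toNat) * 256
        + (PySem.Int.mod z 256).toNat) * 256 + (PySem.Int.mod w 256).toNat)
  = midChunk x 0 ++ midChunk y 1 ++ midChunk z 2 ++ midChunk w 3 := by
  rw [pidsSpec_split (8+8+8) _ _ (modNatLt w), pidsSpec_split (8+8) _ _ (modNatLt z),
    pidsSpec_split 8 _ _ (modNatLt y), pidsSpec_byte x,
    byteChunk y 1 8 (by norm_num), byteChunk z 2 (8+8) (by norm_num),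
    byteChunk w 3 (8+8+8) (by norm_num)]

theorem tail_lemma (pids : List String) :
    (if pids ≠ [] then some ("Поддерживаемые PID: " ++ PySem.Str.join ", " pids)
     else some "Поддерживаемые PID: —")
  = some ("Поддерживаемые PID: " ++ if pids ≠ [] then PySem.Str.join ", " pids else "—") := by
  rcases pids with _ | _ <;> simp

-- A's nested fold over 3 mask bytes = the three byte chunks
theorem pidsA_eq3 (x y z : Int) :
    (PySem.List.enumerate [x, y, z]).foldl (fun pids ib =>
      (PySem.List.pyRange 0 8 1).foldl (fun pids bit =>
        if PySem.Int.band ib.2 ((1 : Int) <<< ((7 : Int) - bit).toNat) ≠ 0 then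
          if ((ib.1 * 8 + bit) + 1) ≤ 32 then pids ++ ["01 " ++ pvHex2 ((ib.1 * 8 + bit) + 1)] else pids
        else pids) pids) []
  = midChunk x 0 ++ midChunk y 1 ++ midChunk z 2 := by
  simp only [PySem.List.enumerate_cons, PySem.List.enumerate_nil, List.foldl]
  simp only [← ite_and]
  rw [PySem.List.foldl_append_ite, PySem.List.foldl_append_ite, PySem.List.foldl_append_ite]
  rw [show PySem.List.pyRange 0 8 1 = [0,1,2,3,4,5,6,7] from by decide]
  rw [dropCap x 0 (by norm_num) (by norm_num), dropCap y (0+1) (by norm_num) (by norm_num),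
    dropCap z (0+1+1) (by norm_num) (by norm_num)]
  norm_num

theorem pidsA_eq4 (x y z w : Int) :
    (PySem.List.enumerate [x, y, z, w]).foldl (fun pids ib =>
      (PySem.List.pyRange 0 8 1).foldl (fun pids bit =>
        if PySem.Int.band ib.2 ((1 : Int) <<< ((7 : Int) - bit).toNat) ≠ 0 then
          if ((ib.1 * 8 + bit) + 1) ≤ 32 then pids ++ ["01 " ++ pvHex2 ((ib.1 * 8 + bit) + 1)] else pids
        else pids) pids) []
  = midChunk x 0 ++ midChunk y 1 ++ midChunk z 2 ++ midChunk w 3 := by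
  simp only [PySem.List.enumerate_cons, PySem.List.enumerate_nil, List.foldl]
  simp only [← ite_and]
  rw [PySem.List.foldl_append_ite, PySem.List.foldl_append_ite, PySem.List.foldl_append_ite,
    PySem.List.foldl_append_ite]
  rw [show PySem.List.pyRange 0 8 1 = [0,1,2,3,4,5,6,7] from by decide]
  rw [dropCap x 0 (by norm_num) (by norm_num), dropCap y (0+1) (by norm_num) (by norm_num),
    dropCap z (0+1+1) (by norm_num) (by norm_num), dropCap w (0+1+1+1) (by norm_num) (by norm_num)]
  norm_num

-- B's loop over the packed 3-byte integer = the same three byte chunks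
theorem pidsB_eq3 (x y z : Int) :
    pvLoop (8 * (([x,y,z] : List Int).length : Int))
      (([x,y,z] : List Int).foldl (fun n b => n * 256 + PySem.Int.mod b 256) 0)
  = midChunk x 0 ++ midChunk y 1 ++ midChunk z 2 := by
  have hN : ([x,y,z] : List Int).foldl (fun n b => n * 256 + PySem.Int.mod b 256) 0
      = (((((PySem.Int.mod x 256).toNat * 256 + (PySem.Int.mod y 256).toNat) * 256
        + (PySem.Int.mod z 256).toNat) : Nat) : Int) := by
    simp only [List.foldl]
    push_cast [modCast]
    ring
  have hw : 8 * ((([x,y,z] : List Int).length : Nat) : Int) = (((8+8+8 : Nat)) : Int) := by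
    norm_num
  rw [hN, hw, pvLoop_eq (8+8+8) _ (by
    have hx := modNatLt x; have hy := modNatLt y; have hz := modNatLt z
    norm_num
    omega)]
  exact spec3 x y z

theorem pidsB_eq4 (x y z w : Int) :
    pvLoop (8 * (([x,y,z,w] : List Int).length : Int))
      (([x,y,z,w] : List Int).foldl (fun n b => n * 256 + PySem.Int.mod b 256) 0)
  = midChunk x 0 ++ midChunk y 1 ++ midChunk z 2 ++ midChunk w 3 := by
  have hN : ([x,y,z,w] : List Int).foldl (fun n b => n * 256 + PySem.Int.mod b 256) 0
      = ((((((PySem.Int.mod x 256).toNat * 256 + (PySem.Int.mod y 256).toNat) * 256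
        + (PySem.Int.mod z 256).toNat) * 256 + (PySem.Int.mod w 256).toNat) : Nat) : Int) := by
    simp only [List.foldl]
    push_cast [modCast]
    ring
  have hw : 8 * ((([x,y,z,w] : List Int).length : Nat) : Int) = (((8+8+8+8 : Nat)) : Int) := by
    norm_num
  rw [hN, hw, pvLoop_eq (8+8+8+8) _ (by
    have hx := modNatLt x; have hy := modNatLt y; have hz := modNatLt z; have hw' := modNatLt w
    norm_num
    omega)]
  exact spec4 x y z w

-- ===== VERDICT (by name: the statement is the Claim_ definition above) =====
theorem fmt_pid_00_spec : Claim_equal_fmt_pid_00 := by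
  intro data _
  unfold Spec_fmt_pid_00 fmt_pid_00 fmt_pid_00_alt
  rcases data with _ | ⟨a, data⟩; · rfl
  rcases data with _ | ⟨b, data⟩; · rfl
  rcases data with _ | ⟨c, data⟩; · rfl
  rcases data with _ | ⟨d, data⟩; · rfl
  rcases data with _ | ⟨e, data⟩; · rfl
  rcases data with _ | ⟨f, rest⟩
  · -- len(data) = 5 : mask = [c,d,e] on both sides
    have h5 : ¬ (([a,b,c,d,e] : List Int).length < 5) := by simp
    have h6 : ¬ (6 ≤ ([a,b,c,d,e] : List Int).length) := by simp
    rw [if_neg h5, if_neg h5, if_neg h6]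
    rw [show PySem.List.slice ([a,b,c,d,e] : List Int) (some 2) none = [c,d,e] from by
      simp [PySem.List.slice_from]]
    rw [show PySem.List.slice ([a,b,c,d,e] : List Int) (some 2) (some 6) = [c,d,e] from by
      simp [PySem.List.slice_toNat]]
    dsimp only
    rw [pidsA_eq3, ← pidsB_eq3]
    exact tail_lemma _
  · -- len(data) ≥ 6 : mask = [c,d,e,f] on both sides
    have h5 : ¬ ((a :: b :: c :: d :: e :: f :: rest).length < 5) := by simp
    have h6 : 6 ≤ (a :: b :: c :: d :: e :: f :: rest).length := by simp
    rw [if_neg h5, if_neg h5, if_pos h6]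
    rw [show PySem.List.slice (a :: b :: c :: d :: e :: f :: rest) (some 2) (some 6) = [c,d,e,f] from by
      simp [PySem.List.slice_toNat]]
    dsimp only
    rw [pidsA_eq4, ← pidsB_eq4]
    exact tail_lemma _
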